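-- pv_equiv track=rewrite | github.com/SantiagoRotman/bingo | src/bingo.py | menor_izq_a_der
-- ===== SOURCE A (Python) =====
-- def menor_izq_a_der(carton):
-- 	aux = -1
-- 	for fila in carton:
-- 		aux = -1
-- 		for celda in fila:
-- 			if celda <= aux and celda != 0:
-- 				return False
-- 			if celda != 0:
-- 				aux = celda
-- 	return True
-- ===== SOURCE B (Python) =====
-- def menor_izq_a_der(carton):
--     # A row passes iff its non-zero cells are all positive and strictly increasing.
--     # (A's running accumulator starts at -1, so a non-positive non-zero cell fails too.)
--     return all(
--         all(c > 0 for c in nz) and all(a < b for a, b in zip(nz, nz[1:]))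
--         for nz in ([c for c in fila if c != 0] for fila in carton)
--     )
-- ===== Notes on version B (the rewrite author's own statement) =====
-- stated objective: simpler
-- what changed: Replaces the running-accumulator scan with early return by a per-row filter of the non-zero cells followed by a positivity check and an adjacent-pair strict-increase check, expressed as one all(...) expression.
import Mathlib
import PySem

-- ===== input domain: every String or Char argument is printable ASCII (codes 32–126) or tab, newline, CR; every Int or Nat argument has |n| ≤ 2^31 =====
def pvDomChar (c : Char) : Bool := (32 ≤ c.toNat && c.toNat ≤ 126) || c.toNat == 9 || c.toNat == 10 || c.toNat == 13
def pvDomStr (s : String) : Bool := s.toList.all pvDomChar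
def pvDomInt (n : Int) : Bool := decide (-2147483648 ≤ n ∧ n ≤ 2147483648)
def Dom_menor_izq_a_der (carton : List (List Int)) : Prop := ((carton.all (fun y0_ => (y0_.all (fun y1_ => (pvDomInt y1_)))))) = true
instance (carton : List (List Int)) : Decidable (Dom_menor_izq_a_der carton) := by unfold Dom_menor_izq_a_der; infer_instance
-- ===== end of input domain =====

-- B replaces A's running-accumulator scan with filter-the-nonzeros, then a positivity
-- check and an adjacent-pair strict-increase check (objective: simpler).

-- ===== PORT A =====
-- inner loop of A: running accumulator aux, early return False
def pvRowA : List Int → Int → Bool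
  | [], _ => true
  | celda :: rest, aux =>
    if celda ≤ aux ∧ celda ≠ 0 then false
    else pvRowA rest (if celda ≠ 0 then celda else aux)

def menor_izq_a_der : List (List Int) → Bool
  | [] => true
  | fila :: rest =>
    if pvRowA fila (-1) then menor_izq_a_der rest else false

-- ===== PORT B =====
-- per-row check of Source B: nz = non-zero cells; all positive and adjacent pairs increasing
def pvRowB (fila : List Int) : Bool :=
  let nz := fila.filter (fun c => decide (c ≠ 0))
  nz.all (fun c => decide (0 < c)) && (nz.zip nz.tail).all (fun p => decide (p.1 < p.2))

def menor_izq_a_der_alt (carton : List (List Int)) : Bool :=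
  carton.all pvRowB

-- ===== PRECONDITION & SPEC =====
def Spec_menor_izq_a_der (carton : List (List Int)) (out : Bool) : Prop := out = menor_izq_a_der_alt carton
instance (carton : List (List Int)) (out : Bool) : Decidable (Spec_menor_izq_a_der carton out) := by unfold Spec_menor_izq_a_der; infer_instance

-- ===== CLAIM (what is proved, stated in full; the proofs are below) =====
def Claim_equal_menor_izq_a_der : Prop := ∀ (carton : List (List Int)), Dom_menor_izq_a_der carton → Spec_menor_izq_a_der carton (menor_izq_a_der carton)

-- ===== LEMMAS AND PROOFS =====

-- A's inner loop checks that aux followed by the non-zero cells forms a <-chain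
theorem pvRowA_eq_chain (fila : List Int) (aux : Int) :
    pvRowA fila aux = true ↔ List.IsChain (· < ·) (aux :: fila.filter (fun c => decide (c ≠ 0))) := by
  induction fila generalizing aux with
  | nil => simp [pvRowA]
  | cons c rest ih =>
    by_cases hc : c = 0
    · subst hc
      simp [pvRowA, ih]
    · simp only [pvRowA, List.filter_cons]
      by_cases hle : c ≤ aux
      · simp [hc, hle, List.isChain_cons_cons]
      · simp [hc, hle, List.isChain_cons_cons, ih]
        omega

-- B's adjacent-pair check is the <-chain property
theorem pvPairs_eq_chain (nz : List Int) :
    ((nz.zip nz.tail).all (fun p => decide (p.1 < p.2)) = true) ↔ List.IsChain (· < ·) nz := by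
  induction nz with
  | nil => simp
  | cons c r ih =>
    cases r with
    | nil => simp
    | cons d r' =>
      simp only [List.tail_cons, List.zip_cons_cons, List.all_cons, Bool.and_eq_true,
        decide_eq_true_eq, List.isChain_cons_cons] at *
      tauto

-- on a list of non-zero integers, a <-chain from -1 = all positive + a <-chain
theorem chain_neg_one (nz : List Int) (h : ∀ c ∈ nz, c ≠ 0) :
    List.IsChain (· < ·) ((-1 : Int) :: nz) ↔ (∀ c ∈ nz, 0 < c) ∧ List.IsChain (· < ·) nz := by
  cases nz with
  | nil => simp
  | cons c r =>
    have hc : c ≠ 0 := h c (by simp)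
    rw [List.isChain_cons_cons]
    constructor
    · rintro ⟨hlt, hch⟩
      refine ⟨?_, hch⟩
      have hp := List.isChain_iff_pairwise.mp hch
      intro d hd
      rcases List.mem_cons.mp hd with rfl | hd
      · omega
      · have hcd : c < d := (List.pairwise_cons.mp hp).1 d hd
        omega
    · rintro ⟨hpos, hch⟩
      exact ⟨by have := hpos c (by simp); omega, hch⟩

-- per-row equality of the two ports
theorem row_eq (fila : List Int) : pvRowA fila (-1) = pvRowB fila := by
  have hmem : ∀ c ∈ fila.filter (fun c => decide (c ≠ 0)), c ≠ 0 := by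
    intro c hcm
    simpa using (List.of_mem_filter hcm)
  rw [Bool.eq_iff_iff, pvRowA_eq_chain, chain_neg_one _ hmem]
  unfold pvRowB
  simp only [Bool.and_eq_true]
  rw [pvPairs_eq_chain]
  simp only [List.all_eq_true, decide_eq_true_eq]

-- the two ports agree on every input (Dom not needed)
theorem top_eq (carton : List (List Int)) :
    menor_izq_a_der carton = menor_izq_a_der_alt carton := by
  unfold menor_izq_a_der_alt
  induction carton with
  | nil => simp [menor_izq_a_der]
  | cons fila rest ih =>
    simp only [menor_izq_a_der, List.all_cons, row_eq]
    cases h : pvRowB fila <;> simp [ih]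

-- ===== VERDICT (by name: the statement is the Claim_ definition above) =====
theorem menor_izq_a_der_spec : Claim_equal_menor_izq_a_der := by
  intro carton _
  unfold Spec_menor_izq_a_der
  exact top_eq carton
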